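-- pv_equiv track=rewrite | github.com/RoryBarnes/vaibify | vaibify/gui/stateManager.py | _fsStatusFromHashes
-- ===== SOURCE A (Python) =====
-- def _fsStatusFromHashes(dictExpected, dictOnDisk):
--     """Classify a step as passed-from-marker / outputs-changed / outputs-missing."""
--     if not dictExpected:
--         return "untested"
--     bAnyMissing = False
--     bAnyChanged = False
--     for sPath, sExpectedSha in dictExpected.items():
--         sActual = dictOnDisk.get(sPath, "")
--         if not sActual:
--             bAnyMissing = True
--             continue
--         if sActual != sExpectedSha:
--             bAnyChanged = True
--     if bAnyMissing:
--         return "outputs-missing"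
--     if bAnyChanged:
--         return "outputs-changed"
--     return "passed-from-marker"
-- ===== SOURCE B (Python) =====
-- def _fsStatusFromHashes(dictExpected, dictOnDisk):
--     """Classify a step as passed-from-marker / outputs-changed / outputs-missing."""
--     if not dictExpected:
--         return "untested"
--     if any(not dictOnDisk.get(sPath, "") for sPath in dictExpected):
--         return "outputs-missing"
--     if any(dictOnDisk.get(sPath, "") != sExpectedSha
--            for sPath, sExpectedSha in dictExpected.items()):
--         return "outputs-changed"
--     return "passed-from-marker"
-- ===== Notes on version B (the rewrite author's own statement) =====
-- stated objective: simpler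
-- what changed: Replaces the single loop that accumulates two boolean flags with two sequential short-circuiting any() scans (missing first, then changed), removing the flag state entirely.
import Mathlib
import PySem

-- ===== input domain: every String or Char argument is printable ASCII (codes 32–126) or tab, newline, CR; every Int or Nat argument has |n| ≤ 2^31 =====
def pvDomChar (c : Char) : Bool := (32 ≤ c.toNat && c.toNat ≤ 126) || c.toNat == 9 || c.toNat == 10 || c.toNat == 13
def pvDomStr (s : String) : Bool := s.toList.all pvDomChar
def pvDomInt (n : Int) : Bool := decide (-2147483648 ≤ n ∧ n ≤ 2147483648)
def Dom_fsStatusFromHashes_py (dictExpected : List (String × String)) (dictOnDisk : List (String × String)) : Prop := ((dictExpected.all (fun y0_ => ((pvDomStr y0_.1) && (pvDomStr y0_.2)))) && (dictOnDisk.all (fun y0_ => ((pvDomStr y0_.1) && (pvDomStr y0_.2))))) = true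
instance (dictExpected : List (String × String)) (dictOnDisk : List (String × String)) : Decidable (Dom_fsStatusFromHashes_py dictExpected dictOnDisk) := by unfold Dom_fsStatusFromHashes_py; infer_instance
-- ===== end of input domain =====

-- B replaces A's one loop accumulating two flags by two sequential short-circuiting
-- existence scans (missing first, then changed); objective: simpler.

-- ===== PORT A =====
-- loop over dictExpected.items() accumulating (bAnyMissing, bAnyChanged)
def fsLoopA (dictOnDisk : PySem.Dict String String) :
    List (String × String) → Bool → Bool → Bool × Bool
  | [], bAnyMissing, bAnyChanged => (bAnyMissing, bAnyChanged)
  | (sPath, sExpectedSha) :: rest, bAnyMissing, bAnyChanged =>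
    let sActual := dictOnDisk.getD sPath ""
    if sActual = "" then fsLoopA dictOnDisk rest true bAnyChanged
    else if sActual ≠ sExpectedSha then fsLoopA dictOnDisk rest bAnyMissing true
    else fsLoopA dictOnDisk rest bAnyMissing bAnyChanged

def fsStatusFromHashes_py (dictExpected : List (String × String)) (dictOnDisk : List (String × String)) : String :=
  if dictExpected = [] then "untested"
  else
    let flags := fsLoopA (PySem.Dict.mk dictOnDisk) dictExpected false false
    if flags.1 then "outputs-missing"
    else if flags.2 then "outputs-changed"
    else "passed-from-marker"

-- ===== PORT B =====
def fsStatusFromHashes_py_alt (dictExpected : List (String × String)) (dictOnDisk : List (String × String)) : String :=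
  if dictExpected = [] then "untested"
  else if dictExpected.any (fun pe => (PySem.Dict.mk dictOnDisk).getD pe.1 "" = "") then
    "outputs-missing"
  else if dictExpected.any (fun pe => (PySem.Dict.mk dictOnDisk).getD pe.1 "" ≠ pe.2) then
    "outputs-changed"
  else "passed-from-marker"

-- ===== PRECONDITION & SPEC =====
def Spec_fsStatusFromHashes_py (dictExpected : List (String × String)) (dictOnDisk : List (String × String)) (out : String) : Prop := out = fsStatusFromHashes_py_alt dictExpected dictOnDisk
instance (dictExpected : List (String × String)) (dictOnDisk : List (String × String)) (out : String) : Decidable (Spec_fsStatusFromHashes_py dictExpected dictOnDisk out) := by unfold Spec_fsStatusFromHashes_py; infer_instance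

-- ===== CLAIM (what is proved, stated in full; the proofs are below) =====
def Claim_equal_fsStatusFromHashes_py : Prop := ∀ (dictExpected : List (String × String)) (dictOnDisk : List (String × String)), Dom_fsStatusFromHashes_py dictExpected dictOnDisk → Spec_fsStatusFromHashes_py dictExpected dictOnDisk (fsStatusFromHashes_py dictExpected dictOnDisk)

-- ===== LEMMAS AND PROOFS =====
theorem any_changed_of_no_missing (dd : PySem.Dict String String) :
    ∀ l : List (String × String),
      (l.any (fun pe => decide (dd.getD pe.1 "" = ""))) = false →
      (l.any (fun pe => ¬ dd.getD pe.1 "" = "" ∧ dd.getD pe.1 "" ≠ pe.2))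
        = l.any (fun pe => dd.getD pe.1 "" ≠ pe.2)
  | [], _ => rfl
  | pe :: rest, h => by
    simp only [List.any_cons, Bool.or_eq_false_iff] at h
    have hne : ¬ dd.getD pe.1 "" = "" := by simpa using h.1
    rw [List.any_cons, List.any_cons, any_changed_of_no_missing dd rest h.2]
    simp [hne]

theorem fsLoopA_fst (dd : PySem.Dict String String) (l : List (String × String))
    (m c : Bool) :
    (fsLoopA dd l m c).1 = (m || l.any (fun pe => dd.getD pe.1 "" = "")) := by
  induction l generalizing m c with
  | nil => simp [fsLoopA]
  | cons pe rest ih =>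
    obtain ⟨p, e⟩ := pe
    simp only [fsLoopA, List.any_cons]
    split_ifs with h1 h2
    · simp [ih, h1]
    · simp [ih, h1]
    · simp [ih, h1]

theorem fsLoopA_snd (dd : PySem.Dict String String) (l : List (String × String))
    (m c : Bool) :
    (fsLoopA dd l m c).2
      = (c || l.any (fun pe => ¬ dd.getD pe.1 "" = "" ∧ dd.getD pe.1 "" ≠ pe.2)) := by
  induction l generalizing m c with
  | nil => simp [fsLoopA]
  | cons pe rest ih =>
    obtain ⟨p, e⟩ := pe
    simp only [fsLoopA, List.any_cons]
    split_ifs with h1 h2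
    · simp [ih, h1]
    · simp [ih, h1, h2]
    · simp [ih, h1, h2]

-- ===== VERDICT (by name: the statement is the Claim_ definition above) =====
theorem fsStatusFromHashes_py_spec : Claim_equal_fsStatusFromHashes_py := by
  unfold Claim_equal_fsStatusFromHashes_py
  intro de dd _
  unfold Spec_fsStatusFromHashes_py fsStatusFromHashes_py fsStatusFromHashes_py_alt
  by_cases hnil : de = []
  · simp [hnil]
  · simp only [hnil, if_false]
    by_cases hmiss : de.any (fun pe => (PySem.Dict.mk dd).getD pe.1 "" = "")
    · simp [fsLoopA_fst, hmiss]
    · have h2 := any_changed_of_no_missing (PySem.Dict.mk dd) de (by simpa using hmiss)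
      have hm : (de.any fun pe => decide ((PySem.Dict.mk dd).getD pe.1 "" = "")) = false := by
        simpa using hmiss
      simp only [fsLoopA_fst, fsLoopA_snd, Bool.false_or, hm, Bool.false_eq_true, if_false]
      rw [h2]
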